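-- pv_equiv track=rewrite | github.com/berntpopp/kidney-genetics-db | scrapers/literature/utils.py | normalize_panel_name
-- ===== SOURCE A (Python) =====
-- def normalize_panel_name(name: str) -> str:
--     """Normalize panel name for consistency.
--
--     Args:
--         name: Raw panel name
--
--     Returns:
--         Normalized panel name
--     """
--     # Remove extra whitespace
--     name = " ".join(name.split())
--
--     # Standardize common terms
--     replacements = {
--         "NGS": "Next Generation Sequencing",
--         "WES": "Whole Exome Sequencing",
--         "WGS": "Whole Genome Sequencing",
--         "&": "and",
--     }
--
--     for old, new in replacements.items():
--         name = name.replace(old, new)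
--
--     return name.strip()
-- ===== SOURCE B (Python) =====
-- def normalize_panel_name(name: str) -> str:
--     """Normalize panel name: collapse whitespace, expand abbreviations in one left-to-right scan."""
--     replacements = {
--         "NGS": "Next Generation Sequencing",
--         "WES": "Whole Exome Sequencing",
--         "WGS": "Whole Genome Sequencing",
--         "&": "and",
--     }
--     s = " ".join(name.split())
--     out = []
--     i = 0
--     while i < len(s):
--         for old, new in replacements.items():
--             if s.startswith(old, i):
--                 out.append(new)
--                 i += len(old)
--                 break
--         else:
--             out.append(s[i])
--             i += 1
--     return "".join(out).strip()
-- ===== Notes on version B (the rewrite author's own statement) =====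
-- stated objective: alternative
-- what changed: The four sequential full-string str.replace passes are replaced by a single left-to-right scan that looks each position up in the replacement table and substitutes in place; equivalence holds because no key occurs in any replacement value and no two keys overlap.
import Mathlib
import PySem

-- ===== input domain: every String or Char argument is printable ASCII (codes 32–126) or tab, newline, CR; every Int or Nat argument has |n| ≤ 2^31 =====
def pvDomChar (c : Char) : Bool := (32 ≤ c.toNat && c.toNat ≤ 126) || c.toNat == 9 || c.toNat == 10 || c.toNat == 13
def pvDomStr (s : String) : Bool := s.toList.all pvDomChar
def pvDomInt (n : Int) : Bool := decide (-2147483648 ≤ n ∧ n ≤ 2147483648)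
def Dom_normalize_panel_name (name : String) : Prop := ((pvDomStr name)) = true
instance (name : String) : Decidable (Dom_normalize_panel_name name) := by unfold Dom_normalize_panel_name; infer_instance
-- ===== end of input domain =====

-- B replaces A's four sequential full-string .replace passes by one left-to-right scan that
-- substitutes each abbreviation as it is met (objective: alternative, single table-driven pass).


-- ===== PORT A =====
-- A: collapse whitespace, then four sequential str.replace passes in dict order, then strip.
def normalize_panel_name (name : String) : String :=
  let n1 := PySem.Chars.join [' '] (PySem.Chars.split₀ name.toList)
  let n2 := PySem.Chars.replace n1 "NGS".toList "Next Generation Sequencing".toList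
  let n3 := PySem.Chars.replace n2 "WES".toList "Whole Exome Sequencing".toList
  let n4 := PySem.Chars.replace n3 "WGS".toList "Whole Genome Sequencing".toList
  let n5 := PySem.Chars.replace n4 "&".toList "and".toList
  String.ofList (PySem.Chars.strip n5)

-- ===== PORT B =====
-- B's while loop over position i, carried as the remaining suffix; the for/break/else over the
-- replacement table becomes the if-chain in dict order.
def pvScanB : List Char → List Char
  | [] => []
  | c :: t =>
    if PySem.Chars.startswith (c :: t) "NGS".toList then
      "Next Generation Sequencing".toList ++ pvScanB (t.drop 2)
    else if PySem.Chars.startswith (c :: t) "WES".toList then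
      "Whole Exome Sequencing".toList ++ pvScanB (t.drop 2)
    else if PySem.Chars.startswith (c :: t) "WGS".toList then
      "Whole Genome Sequencing".toList ++ pvScanB (t.drop 2)
    else if PySem.Chars.startswith (c :: t) "&".toList then
      "and".toList ++ pvScanB t
    else c :: pvScanB t
termination_by l => l.length
decreasing_by all_goals (simp only [List.length_cons, List.length_drop]; omega)

def normalize_panel_name_alt (name : String) : String :=
  let s := PySem.Chars.join [' '] (PySem.Chars.split₀ name.toList)
  String.ofList (PySem.Chars.strip (pvScanB s))

-- ===== PRECONDITION & SPEC =====
def Spec_normalize_panel_name (name : String) (out : String) : Prop := out = normalize_panel_name_alt name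
instance (name : String) (out : String) : Decidable (Spec_normalize_panel_name name out) := by unfold Spec_normalize_panel_name; infer_instance

-- ===== CLAIM (what is proved, stated in full; the proofs are below) =====
def Claim_equal_normalize_panel_name : Prop := ∀ (name : String), Dom_normalize_panel_name name → Spec_normalize_panel_name name (normalize_panel_name name)

-- ===== LEMMAS AND PROOFS =====

-- fuel-free structural form of PySem.Chars.replace for a nonempty pattern
def pvRepl1 (old new : List Char) : List Char → List Char
  | [] => []
  | c :: t =>
    if List.isPrefixOf old (c :: t) then new ++ pvRepl1 old new (t.drop (old.length - 1))
    else c :: pvRepl1 old new t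
termination_by l => l.length
decreasing_by all_goals (simp only [List.length_cons, List.length_drop]; omega)

lemma pvGo_eq (old new : List Char) (hold : old ≠ []) :
    ∀ (fuel : Nat) (l acc : List Char), l.length ≤ fuel →
      PySem.Chars.replace.go old new fuel l acc = acc.reverse ++ pvRepl1 old new l := by
  intro fuel
  induction fuel with
  | zero =>
    intro l acc h
    have hl : l = [] := by cases l <;> simp_all
    subst hl
    simp [PySem.Chars.replace.go, pvRepl1]
  | succ f ih =>
    intro l acc h
    cases l with
    | nil => simp [PySem.Chars.replace.go, pvRepl1]
    | cons c t =>
      rw [PySem.Chars.replace.go]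
      simp only [List.length_cons] at h
      have h1o : 1 ≤ old.length := by
        cases old with
        | nil => exact absurd rfl hold
        | cons o os => simp
      have hdrop : List.drop old.length (c :: t) = t.drop (old.length - 1) := by
        cases old with
        | nil => exact absurd rfl hold
        | cons o os => simp
      by_cases hp : old.isPrefixOf (c :: t)
      · simp only [hp, if_true]
        have hlen : (List.drop old.length (c :: t)).length ≤ f := by
          simp only [List.length_drop, List.length_cons]
          omega
        rw [ih _ _ hlen, pvRepl1]
        simp [hp, hdrop]
      · simp only [hp]
        rw [if_neg (by simp)]
        have hlen : t.length ≤ f := by simpa using h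
        rw [ih _ _ hlen, pvRepl1]
        simp [hp]

lemma pvReplace_eq (s old new : List Char) (h : old ≠ []) :
    PySem.Chars.replace s old new = pvRepl1 old new s := by
  rw [PySem.Chars.replace]
  have : old.isEmpty = false := by
    cases old with
    | nil => exact absurd rfl h
    | cons o os => rfl
  rw [this]
  simpa using pvGo_eq old new h s.length s [] le_rfl

lemma pvRepl1_append (old new p : List Char)
    (h : ∀ i, i < p.length → ¬ old <+: p.drop i ∧ ¬ p.drop i <+: old) (X : List Char) :
    pvRepl1 old new (p ++ X) = p ++ pvRepl1 old new X := by
  induction p with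
  | nil => simp
  | cons a q ih =>
    have h0 := h 0 (by simp)
    simp only [List.drop_zero] at h0
    have hnp : ¬ List.isPrefixOf old (a :: (q ++ X)) := by
      rw [List.isPrefixOf_iff_prefix]
      intro hpre
      rcases List.prefix_or_prefix_of_prefix hpre (List.prefix_append (a :: q) X) with h1 | h1
      · exact h0.1 h1
      · exact h0.2 h1
    rw [List.cons_append, pvRepl1, if_neg hnp,
        ih (fun i hi => by simpa using h (i + 1) (by simpa using Nat.succ_lt_succ hi)),
        List.cons_append]

lemma pvReflect (old new k : List Char) (hlen : k.length ≤ new.length)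
    (hk : ∀ k' ∈ k.tails, k' ≠ [] → ¬ k' <+: new) :
    ∀ (n : Nat) (u : List Char), u.length ≤ n → ∀ k' ∈ k.tails, k' <+: pvRepl1 old new u → k' <+: u := by
  intro n
  induction n with
  | zero =>
    intro u hu k' hk' hp
    have : u = [] := by cases u <;> simp_all
    subst this
    simpa [pvRepl1] using hp
  | succ m ih =>
    intro u hu k' hk' hp
    cases u with
    | nil => simpa [pvRepl1] using hp
    | cons c t =>
      rw [pvRepl1] at hp
      by_cases hm : List.isPrefixOf old (c :: t)
      · simp only [hm, if_true] at hp
        cases k'' : k' with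
        | nil => exact List.nil_prefix
        | cons d k1 =>
          subst k''
          have hne : (d :: k1) ≠ [] := by simp
          have hlen' : (d :: k1).length ≤ new.length :=
            le_trans (List.IsSuffix.length_le ((List.mem_tails _ _).mp hk')) hlen
          rcases List.prefix_or_prefix_of_prefix hp (List.prefix_append new _) with h1 | h1
          · exact absurd h1 (hk _ hk' hne)
          · have heq : new = d :: k1 := List.IsPrefix.eq_of_length_le h1 hlen'
            have hpn : (d :: k1) <+: new := by rw [heq]
            exact absurd hpn (hk _ hk' hne)
      · simp only [hm] at hp
        rw [if_neg (by simp)] at hp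
        cases k'' : k' with
        | nil => exact List.nil_prefix
        | cons d k1 =>
          subst k''
          rcases List.cons_prefix_cons.mp hp with ⟨hd, htl⟩
          subst hd
          have hk1 : k1 ∈ k.tails := by
            have h1 : k1 <:+ d :: k1 := ⟨[d], rfl⟩
            exact (List.mem_tails _ _).mpr (h1.trans ((List.mem_tails _ _).mp hk'))
          have := ih t (by simpa using hu) k1 hk1 htl
          exact List.cons_prefix_cons.mpr ⟨rfl, this⟩

-- pvRepl1 on a string starting with its own pattern
lemma pvRepl1_self (old new Y : List Char) (h : old ≠ []) :
    pvRepl1 old new (old ++ Y) = new ++ pvRepl1 old new Y := by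
  cases old with
  | nil => exact absurd rfl h
  | cons o os =>
    rw [List.cons_append, pvRepl1, if_pos (by rw [List.isPrefixOf_iff_prefix]; exact ⟨Y, rfl⟩)]
    have hd : (o :: os).length - 1 = os.length := by simp
    rw [hd, List.drop_left]

lemma pvMain : ∀ (n : Nat) (u : List Char), u.length ≤ n →
    pvRepl1 "&".toList "and".toList
      (pvRepl1 "WGS".toList "Whole Genome Sequencing".toList
        (pvRepl1 "WES".toList "Whole Exome Sequencing".toList
          (pvRepl1 "NGS".toList "Next Generation Sequencing".toList u))) = pvScanB u := by
  intro n
  induction n with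
  | zero =>
    intro u hu
    have h : u = [] := by cases u <;> simp_all
    subst h
    simp [pvRepl1, pvScanB]
  | succ m ih =>
    intro u hu
    cases u with
    | nil => simp [pvRepl1, pvScanB]
    | cons c t =>
      simp only [List.length_cons] at hu
      by_cases h1 : "NGS".toList <+: (c :: t)
      · obtain ⟨r, hr⟩ := h1
        have hrl : r.length ≤ m := by
          have := congrArg List.length hr
          simp at this
          omega
        rw [← hr,
            pvRepl1_self "NGS".toList "Next Generation Sequencing".toList r (by decide),
            pvRepl1_append "WES".toList "Whole Exome Sequencing".toList
              "Next Generation Sequencing".toList (by decide),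
            pvRepl1_append "WGS".toList "Whole Genome Sequencing".toList
              "Next Generation Sequencing".toList (by decide),
            pvRepl1_append "&".toList "and".toList
              "Next Generation Sequencing".toList (by decide),
            ih r hrl,
            show "NGS".toList ++ r = 'N' :: 'G' :: 'S' :: r from rfl,
            pvScanB, if_pos (by simp [PySem.Chars.startswith, List.isPrefixOf])]
        simp
      · by_cases h2 : "WES".toList <+: (c :: t)
        · obtain ⟨r, hr⟩ := h2
          have hrl : r.length ≤ m := by
            have := congrArg List.length hr
            simp at this
            omega
          rw [← hr,
              pvRepl1_append "NGS".toList "Next Generation Sequencing".toList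
                "WES".toList (by decide),
              pvRepl1_self "WES".toList "Whole Exome Sequencing".toList _ (by decide),
              pvRepl1_append "WGS".toList "Whole Genome Sequencing".toList
                "Whole Exome Sequencing".toList (by decide),
              pvRepl1_append "&".toList "and".toList
                "Whole Exome Sequencing".toList (by decide),
              ih r hrl,
              show "WES".toList ++ r = 'W' :: 'E' :: 'S' :: r from rfl,
              pvScanB,
              if_neg (by simp [PySem.Chars.startswith, List.isPrefixOf]),
              if_pos (by simp [PySem.Chars.startswith, List.isPrefixOf])]
          simp
        · by_cases h3 : "WGS".toList <+: (c :: t)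
          · obtain ⟨r, hr⟩ := h3
            have hrl : r.length ≤ m := by
              have := congrArg List.length hr
              simp at this
              omega
            rw [← hr,
                pvRepl1_append "NGS".toList "Next Generation Sequencing".toList
                  "WGS".toList (by decide),
                pvRepl1_append "WES".toList "Whole Exome Sequencing".toList
                  "WGS".toList (by decide),
                pvRepl1_self "WGS".toList "Whole Genome Sequencing".toList _ (by decide),
                pvRepl1_append "&".toList "and".toList
                  "Whole Genome Sequencing".toList (by decide),
                ih r hrl,
                show "WGS".toList ++ r = 'W' :: 'G' :: 'S' :: r from rfl,
                pvScanB,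
                if_neg (by simp [PySem.Chars.startswith, List.isPrefixOf]),
                if_neg (by simp [PySem.Chars.startswith, List.isPrefixOf]),
                if_pos (by simp [PySem.Chars.startswith, List.isPrefixOf])]
            simp
          · by_cases h4 : "&".toList <+: (c :: t)
            · obtain ⟨r, hr⟩ := h4
              have hrl : r.length ≤ m := by
                have := congrArg List.length hr
                simp at this
                omega
              rw [← hr,
                  pvRepl1_append "NGS".toList "Next Generation Sequencing".toList
                    "&".toList (by decide),
                  pvRepl1_append "WES".toList "Whole Exome Sequencing".toList
                    "&".toList (by decide),
                  pvRepl1_append "WGS".toList "Whole Genome Sequencing".toList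
                    "&".toList (by decide),
                  pvRepl1_self "&".toList "and".toList _ (by decide),
                  ih r hrl,
                  show "&".toList ++ r = '&' :: r from rfl,
                  pvScanB,
                  if_neg (by simp [PySem.Chars.startswith, List.isPrefixOf]),
                  if_neg (by simp [PySem.Chars.startswith, List.isPrefixOf]),
                  if_neg (by simp [PySem.Chars.startswith, List.isPrefixOf]),
                  if_pos (by simp [PySem.Chars.startswith, List.isPrefixOf])]
            · -- no table entry matches at this position
              have e1 : pvRepl1 "NGS".toList "Next Generation Sequencing".toList (c :: t)
                  = c :: pvRepl1 "NGS".toList "Next Generation Sequencing".toList t := by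
                rw [pvRepl1, if_neg (by rw [List.isPrefixOf_iff_prefix]; exact h1)]
              have hw : ¬ ("WES".toList <+:
                  pvRepl1 "NGS".toList "Next Generation Sequencing".toList (c :: t)) := by
                intro hp
                exact h2 (pvReflect "NGS".toList "Next Generation Sequencing".toList
                  "WES".toList (by decide) (by decide) (c :: t).length (c :: t) le_rfl _
                  ((List.mem_tails _ _).mpr List.suffix_rfl) hp)
              have e2 : pvRepl1 "WES".toList "Whole Exome Sequencing".toList
                    (pvRepl1 "NGS".toList "Next Generation Sequencing".toList (c :: t))
                  = c :: pvRepl1 "WES".toList "Whole Exome Sequencing".toList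
                      (pvRepl1 "NGS".toList "Next Generation Sequencing".toList t) := by
                rw [e1] at hw ⊢
                rw [pvRepl1, if_neg (by rw [List.isPrefixOf_iff_prefix]; exact hw)]
              have hg : ¬ ("WGS".toList <+:
                  pvRepl1 "WES".toList "Whole Exome Sequencing".toList
                    (pvRepl1 "NGS".toList "Next Generation Sequencing".toList (c :: t))) := by
                intro hp
                have hp1 := pvReflect "WES".toList "Whole Exome Sequencing".toList
                  "WGS".toList (by decide) (by decide) _ _ le_rfl _
                  ((List.mem_tails _ _).mpr List.suffix_rfl) hp
                have hp2 := pvReflect "NGS".toList "Next Generation Sequencing".toList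
                  "WGS".toList (by decide) (by decide) (c :: t).length (c :: t) le_rfl _
                  ((List.mem_tails _ _).mpr List.suffix_rfl) hp1
                exact h3 hp2
              have e3 : pvRepl1 "WGS".toList "Whole Genome Sequencing".toList
                    (pvRepl1 "WES".toList "Whole Exome Sequencing".toList
                      (pvRepl1 "NGS".toList "Next Generation Sequencing".toList (c :: t)))
                  = c :: pvRepl1 "WGS".toList "Whole Genome Sequencing".toList
                      (pvRepl1 "WES".toList "Whole Exome Sequencing".toList
                        (pvRepl1 "NGS".toList "Next Generation Sequencing".toList t)) := by
                rw [e2] at hg ⊢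
                rw [pvRepl1, if_neg (by rw [List.isPrefixOf_iff_prefix]; exact hg)]
              have ha : ¬ ("&".toList <+:
                  pvRepl1 "WGS".toList "Whole Genome Sequencing".toList
                    (pvRepl1 "WES".toList "Whole Exome Sequencing".toList
                      (pvRepl1 "NGS".toList "Next Generation Sequencing".toList (c :: t)))) := by
                intro hp
                have hp1 := pvReflect "WGS".toList "Whole Genome Sequencing".toList
                  "&".toList (by decide) (by decide) _ _ le_rfl _
                  ((List.mem_tails _ _).mpr List.suffix_rfl) hp
                have hp2 := pvReflect "WES".toList "Whole Exome Sequencing".toList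
                  "&".toList (by decide) (by decide) _ _ le_rfl _
                  ((List.mem_tails _ _).mpr List.suffix_rfl) hp1
                have hp3 := pvReflect "NGS".toList "Next Generation Sequencing".toList
                  "&".toList (by decide) (by decide) (c :: t).length (c :: t) le_rfl _
                  ((List.mem_tails _ _).mpr List.suffix_rfl) hp2
                exact h4 hp3
              have e4 : pvRepl1 "&".toList "and".toList
                    (pvRepl1 "WGS".toList "Whole Genome Sequencing".toList
                      (pvRepl1 "WES".toList "Whole Exome Sequencing".toList
                        (pvRepl1 "NGS".toList "Next Generation Sequencing".toList (c :: t))))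
                  = c :: pvRepl1 "&".toList "and".toList
                      (pvRepl1 "WGS".toList "Whole Genome Sequencing".toList
                        (pvRepl1 "WES".toList "Whole Exome Sequencing".toList
                          (pvRepl1 "NGS".toList "Next Generation Sequencing".toList t))) := by
                rw [e3] at ha ⊢
                rw [pvRepl1, if_neg (by rw [List.isPrefixOf_iff_prefix]; exact ha)]
              have g1 : ¬ (PySem.Chars.startswith (c :: t) "NGS".toList = true) := by
                simp only [PySem.Chars.startswith]; rw [List.isPrefixOf_iff_prefix]; exact h1
              have g2 : ¬ (PySem.Chars.startswith (c :: t) "WES".toList = true) := by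
                simp only [PySem.Chars.startswith]; rw [List.isPrefixOf_iff_prefix]; exact h2
              have g3 : ¬ (PySem.Chars.startswith (c :: t) "WGS".toList = true) := by
                simp only [PySem.Chars.startswith]; rw [List.isPrefixOf_iff_prefix]; exact h3
              have g4 : ¬ (PySem.Chars.startswith (c :: t) "&".toList = true) := by
                simp only [PySem.Chars.startswith]; rw [List.isPrefixOf_iff_prefix]; exact h4
              rw [e4, ih t (by omega), pvScanB, if_neg g1, if_neg g2, if_neg g3, if_neg g4]

-- ===== VERDICT (by name: the statement is the Claim_ definition above) =====
theorem normalize_panel_name_spec : Claim_equal_normalize_panel_name := by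
  intro name _
  unfold Spec_normalize_panel_name normalize_panel_name normalize_panel_name_alt
  simp only []
  rw [pvReplace_eq _ _ _ (by decide), pvReplace_eq _ _ _ (by decide),
      pvReplace_eq _ _ _ (by decide), pvReplace_eq _ _ _ (by decide),
      pvMain (PySem.Chars.join [' '] (PySem.Chars.split₀ name.toList)).length _ le_rfl]
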